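-- pv_equiv track=rewrite | github.com/iagmla/Heka | scroll.py | word_scroll
-- ===== SOURCE A (Python) =====
-- def word_scroll(word, depth):
--     word_len = len(word)
--     scroll = []
--     scroll.append(word)
--     for x in range(depth):
--         new_word = ""
--         for y in range(word_len):
--             num = ord(scroll[x][y]) - 65
--             letter = chr(((num + num) % 26) + 65)
--             new_word += letter
--         if new_word not in scroll:
--             scroll.append(new_word)
--         else:
--             break
--     return scroll
-- ===== SOURCE B (Python) =====
-- def word_scroll(word, depth):
--     base = [ord(c) - 65 for c in word]
--     scroll = [word]
--     factor = 1
--     for _ in range(depth):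
--         factor = factor * 2 % 26
--         new_word = "".join(chr(n * factor % 26 + 65) for n in base)
--         if new_word in scroll:
--             break
--         scroll.append(new_word)
--     return scroll
-- ===== Notes on version B (the rewrite author's own statement) =====
-- stated objective: alternative
-- what changed: Each generation is computed directly from the original word by a running factor 2^k mod 26 (one join over precomputed letter values), instead of iterating the doubling map on the previously built word with character-by-character string concatenation.
import Mathlib
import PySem

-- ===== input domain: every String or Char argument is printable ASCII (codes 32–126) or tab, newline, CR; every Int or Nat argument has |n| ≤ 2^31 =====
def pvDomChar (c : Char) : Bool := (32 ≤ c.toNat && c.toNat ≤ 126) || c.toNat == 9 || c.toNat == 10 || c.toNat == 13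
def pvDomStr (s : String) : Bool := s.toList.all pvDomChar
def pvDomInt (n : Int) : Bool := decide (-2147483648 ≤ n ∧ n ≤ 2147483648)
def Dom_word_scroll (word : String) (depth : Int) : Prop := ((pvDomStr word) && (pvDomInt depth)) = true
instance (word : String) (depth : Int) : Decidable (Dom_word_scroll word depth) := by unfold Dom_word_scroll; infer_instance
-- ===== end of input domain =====

-- B derives each generation directly from the original word via a running factor 2^k mod 26,
-- instead of iterating the per-character doubling map on the previously built word (objective: alternative).

-- ===== PORT A =====
-- letter = chr(((num + num) % 26) + 65) with num = ord(c) - 65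
def wsDouble (c : Char) : Char :=
  Char.ofNat ((PySem.Int.mod (((c.toNat : Int) - 65) + ((c.toNat : Int) - 65)) 26 + 65).toNat)

-- inner loop: for y in range(word_len): new_word += letter
def wsNewWord (prev : List Char) (wordLen : Nat) : List Char :=
  (List.range wordLen).foldl (fun acc y => acc ++ [wsDouble (prev.getD y ' ')]) []

-- outer loop: for x in range(depth) with early break; fuel = depth.toNat, x the loop index.
-- scroll[x] is always in range in A (x < len(scroll) is an invariant), so getD's default is never used.
def wsLoopA (wordLen : Nat) (scroll : List String) (x : Nat) : Nat → List String
  | 0 => scroll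
  | fuel+1 =>
    if String.ofList (wsNewWord (scroll.getD x "").toList wordLen) ∉ scroll then
      wsLoopA wordLen (scroll ++ [String.ofList (wsNewWord (scroll.getD x "").toList wordLen)]) (x+1) fuel
    else scroll

def word_scroll (word : String) (depth : Int) : List String :=
  wsLoopA word.toList.length [word] 0 depth.toNat

-- ===== PORT B =====
-- chr(n * factor % 26 + 65)
def wsChar (factor n : Int) : Char :=
  Char.ofNat ((PySem.Int.mod (n * factor) 26 + 65).toNat)

-- for _ in range(depth): factor = factor*2 % 26; new_word from base; break on repeat
def wsLoopB (base : List Int) (scroll : List String) (factor : Int) : Nat → List String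
  | 0 => scroll
  | fuel+1 =>
    if String.ofList (base.map (wsChar (PySem.Int.mod (factor * 2) 26))) ∈ scroll then scroll
    else wsLoopB base (scroll ++ [String.ofList (base.map (wsChar (PySem.Int.mod (factor * 2) 26)))])
           (PySem.Int.mod (factor * 2) 26) fuel

def word_scroll_alt (word : String) (depth : Int) : List String :=
  wsLoopB (word.toList.map (fun c => (c.toNat : Int) - 65)) [word] 1 depth.toNat

-- ===== PRECONDITION & SPEC =====
def Spec_word_scroll (word : String) (depth : Int) (out : List String) : Prop := out = word_scroll_alt word depth
instance (word : String) (depth : Int) (out : List String) : Decidable (Spec_word_scroll word depth out) := by unfold Spec_word_scroll; infer_instance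

-- ===== CLAIM (what is proved, stated in full; the proofs are below) =====
def Claim_equal_word_scroll : Prop := ∀ (word : String) (depth : Int), Dom_word_scroll word depth → Spec_word_scroll word depth (word_scroll word depth)

-- ===== LEMMAS AND PROOFS =====

-- Python % with the positive literal modulus 26 is Int.emod
lemma mod26 (a : Int) : PySem.Int.mod a 26 = a % 26 := PySem.Int.mod_eq_emod_of_pos (by norm_num)

-- doubling the character encoding residue v (0 ≤ v < 26) reads back v
lemma wsChar_toNat (f n : Int) :
    ((wsChar f n).toNat : Int) - 65 = PySem.Int.mod (n * f) 26 := by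
  have h0 : 0 ≤ PySem.Int.mod (n * f) 26 := PySem.Int.mod_nonneg _ (by norm_num)
  have h1 : PySem.Int.mod (n * f) 26 < 26 := PySem.Int.mod_lt _ (by norm_num)
  unfold wsChar
  set v := PySem.Int.mod (n * f) 26 with hv
  interval_cases v <;> decide

-- A's doubling map on a closed-form character is the closed form at the doubled factor
lemma wsDouble_wsChar (f n : Int) :
    wsDouble (wsChar f n) = wsChar (PySem.Int.mod (f * 2) 26) n := by
  unfold wsDouble
  rw [wsChar_toNat]
  unfold wsChar
  congr 2
  simp only [mod26]
  have hL : ((n*f) % 26 + (n*f) % 26) % 26 = ((n*f)*2) % 26 := by omega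
  have hR : (n * ((f*2) % 26)) % 26 = ((n*f)*2) % 26 := by
    conv_lhs => rw [Int.mul_emod]
    conv_rhs => rw [Int.mul_assoc, Int.mul_emod]
    rw [Int.emod_emod_of_dvd _ (dvd_refl 26)]
  rw [hL, hR]

-- the inner A loop over range(word_len) is a map when the word has that length
lemma wsNewWord_eq_map (l : List Char) : wsNewWord l l.length = l.map wsDouble := by
  unfold wsNewWord
  rw [PySem.List.foldl_append_singleton_eq_map]
  apply List.ext_getElem
  · simp
  · intro i h1 h2
    have hi : i < l.length := by simpa using h2
    simp [List.getD_eq_getElem?_getD, List.getElem?_eq_getElem hi]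

-- first step: doubling the original word is the closed form at factor 2
lemma wsNewWord_word (l : List Char) :
    wsNewWord l l.length = (l.map (fun c => (c.toNat : Int) - 65)).map (wsChar 2) := by
  rw [wsNewWord_eq_map, List.map_map]
  apply List.map_congr_left
  intro c _
  unfold wsDouble wsChar Function.comp
  congr 2
  simp only [mod26]
  omega

-- subsequent steps: doubling a closed-form word doubles the factor
lemma wsNewWord_closed (base : List Int) (f : Int) :
    wsNewWord (base.map (wsChar f)) base.length
      = base.map (wsChar (PySem.Int.mod (f * 2) 26)) := by
  have h : base.length = (base.map (wsChar f)).length := by simp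
  rw [h, wsNewWord_eq_map, List.map_map]
  apply List.map_congr_left
  intro n _
  exact wsDouble_wsChar f n

-- main loop invariant: A's state (pre ++ [prev], x = |pre|) matches B's (same scroll, factor f),
-- provided A's next word from prev is B's next word from base at factor f*2 % 26
lemma loop_eq (base : List Int) : ∀ (fuel : Nat) (pre : List String) (prev : String) (f : Int),
    wsNewWord prev.toList base.length = base.map (wsChar (PySem.Int.mod (f * 2) 26)) →
    wsLoopA base.length (pre ++ [prev]) pre.length fuel = wsLoopB base (pre ++ [prev]) f fuel := by
  intro fuel
  induction fuel with
  | zero => intro pre prev f _; rfl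
  | succ fuel ih =>
    intro pre prev f h
    unfold wsLoopA wsLoopB
    have hget : (pre ++ [prev]).getD pre.length "" = prev := by simp [List.getD]
    rw [hget, h]
    by_cases hmem : String.ofList (base.map (wsChar (PySem.Int.mod (f * 2) 26))) ∈ pre ++ [prev]
    · rw [if_neg (not_not_intro hmem), if_pos hmem]
    · rw [if_pos hmem, if_neg hmem]
      have hlen : pre.length + 1 = (pre ++ [prev]).length := by simp
      rw [hlen]
      apply ih
      rw [String.toList_ofList, wsNewWord_closed]

-- ===== VERDICT (by name: the statement is the Claim_ definition above) =====
theorem word_scroll_spec : Claim_equal_word_scroll := by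
  intro word depth _
  unfold Spec_word_scroll word_scroll word_scroll_alt
  have hlen : word.toList.length = (word.toList.map (fun c => (c.toNat : Int) - 65)).length := by simp
  rw [hlen]
  have h0 : ([] : List String).length = 0 := rfl
  rw [show ([word] : List String) = [] ++ [word] from rfl, ← h0]
  apply loop_eq
  have h2 : PySem.Int.mod ((1 : Int) * 2) 26 = 2 := by decide
  rw [h2, ← hlen, wsNewWord_word]
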